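-- pv_equiv track=rewrite | github.com/Aikiooo/7dsGems | command.py | weeklyCalc
-- ===== SOURCE A (Python) =====
-- def weeklyCalc(boolWeekly, days, startingDayWeekly):
--     gemsFromWeekly = 0
--     if boolWeekly == False:
--         return gemsFromWeekly
--     if boolWeekly == True:
--         iterations = 0
--         day = startingDayWeekly
--
--         while iterations < days:
--             gemsFromWeekly += 7
--             day += 1
--             if day > 7:
--                 gemsFromWeekly += 10
--                 day = 1
--             iterations += 1
--         return gemsFromWeekly
-- ===== SOURCE B (Python) =====
-- def weeklyCalc(boolWeekly, days, startingDayWeekly):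
--     # closed form: 7 gems per day, plus a 10-gem bonus each time the day
--     # counter passes 7; the first bonus lands on iteration max(1, 8 - start),
--     # subsequent bonuses every 7 iterations after that.
--     if not boolWeekly or days <= 0:
--         return 0
--     first = max(1, 8 - startingDayWeekly)
--     bonuses = 0 if first > days else 1 + (days - first) // 7
--     return 7 * days + 10 * bonuses
-- ===== Notes on version B (the rewrite author's own statement) =====
-- stated objective: faster
-- what changed: replaces the per-day while loop with an O(1) closed form: 7*days plus 10 per week boundary, the first boundary at iteration max(1, 8-startingDayWeekly) and then every 7 iterations
import Mathlib
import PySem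

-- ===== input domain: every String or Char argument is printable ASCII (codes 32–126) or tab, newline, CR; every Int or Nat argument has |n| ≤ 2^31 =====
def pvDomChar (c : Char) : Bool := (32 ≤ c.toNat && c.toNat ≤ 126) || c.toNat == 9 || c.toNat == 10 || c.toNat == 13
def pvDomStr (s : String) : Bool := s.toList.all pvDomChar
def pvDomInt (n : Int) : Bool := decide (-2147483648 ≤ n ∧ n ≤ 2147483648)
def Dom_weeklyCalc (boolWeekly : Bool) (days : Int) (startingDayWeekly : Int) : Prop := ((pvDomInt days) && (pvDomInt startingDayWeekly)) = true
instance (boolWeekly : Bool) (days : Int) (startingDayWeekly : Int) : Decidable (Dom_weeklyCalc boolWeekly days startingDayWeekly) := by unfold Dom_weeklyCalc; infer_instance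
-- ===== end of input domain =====

-- B replaces A's per-day while loop by an O(1) closed form (7*days plus 10 per week boundary).


-- ===== PORT A =====
-- the while loop of A: state (gemsFromWeekly, day, iterations); runs while iterations < days
def weeklyCalcLoop (gems day iterations days : Int) : Int :=
  if _h : iterations < days then
    let gems := gems + 7
    let day := day + 1
    let (gems, day) := if day > 7 then (gems + 10, (1 : Int)) else (gems, day)
    weeklyCalcLoop gems day (iterations + 1) days
  else gems
termination_by (days - iterations).toNat
decreasing_by omega

def weeklyCalc (boolWeekly : Bool) (days : Int) (startingDayWeekly : Int) : Int :=
  if boolWeekly = false then 0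
  else weeklyCalcLoop 0 startingDayWeekly 0 days

-- ===== PORT B =====
def weeklyCalc_alt (boolWeekly : Bool) (days : Int) (startingDayWeekly : Int) : Int :=
  if !boolWeekly || days ≤ 0 then 0
  else
    let first := max 1 (8 - startingDayWeekly)
    let bonuses := if first > days then 0 else 1 + PySem.Int.floordiv (days - first) 7
    7 * days + 10 * bonuses

-- ===== PRECONDITION & SPEC =====
def Spec_weeklyCalc (boolWeekly : Bool) (days : Int) (startingDayWeekly : Int) (out : Int) : Prop := out = weeklyCalc_alt boolWeekly days startingDayWeekly
instance (boolWeekly : Bool) (days : Int) (startingDayWeekly : Int) (out : Int) : Decidable (Spec_weeklyCalc boolWeekly days startingDayWeekly out) := by unfold Spec_weeklyCalc; infer_instance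

-- ===== CLAIM (what is proved, stated in full; the proofs are below) =====
def Claim_equal_weeklyCalc : Prop := ∀ (boolWeekly : Bool) (days : Int) (startingDayWeekly : Int), Dom_weeklyCalc boolWeekly days startingDayWeekly → Spec_weeklyCalc boolWeekly days startingDayWeekly (weeklyCalc boolWeekly days startingDayWeekly)

-- ===== LEMMAS AND PROOFS =====

-- closed form for the number of bonuses the loop pays over n remaining iterations
def bonusCF (n day : Int) : Int :=
  if max 1 (8 - day) > n then 0 else 1 + (n - max 1 (8 - day)) / 7

lemma weeklyCalcLoop_eq (n : Nat) :
    ∀ (gems day iterations days : Int), days - iterations = n →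
      weeklyCalcLoop gems day iterations days = gems + 7 * n + 10 * bonusCF n day := by
  induction n with
  | zero =>
    intro gems day it days h
    rw [weeklyCalcLoop]
    simp only [show ¬ it < days by omega, dif_neg, not_false_iff]
    simp [bonusCF]
  | succ k ih =>
    intro gems day it days h
    rw [weeklyCalcLoop]
    have hlt : it < days := by omega
    simp only [dif_pos hlt]
    by_cases hd : day + 1 > 7
    · simp only [if_pos hd]
      rw [ih _ _ _ _ (by omega)]
      simp only [bonusCF]
      have h1 : max 1 (8 - day) = 1 := by omega
      have h7 : max 1 (8 - (1:Int)) = 7 := by norm_num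
      rw [h1, h7]
      split_ifs with h2 h3 h3 <;> push_cast <;> omega
    · simp only [if_neg hd]
      rw [ih _ _ _ _ (by omega)]
      simp only [bonusCF]
      have hle : day ≤ 6 := by omega
      have h1 : max 1 (8 - day) = 8 - day := by omega
      have h2 : max 1 (8 - (day + 1)) = 7 - day := by omega
      rw [h1, h2]
      split_ifs with h3 h4 h4 <;> push_cast <;> omega

-- ===== VERDICT (by name: the statement is the Claim_ definition above) =====
theorem weeklyCalc_spec : Claim_equal_weeklyCalc := by
  intro b days s _
  unfold Spec_weeklyCalc weeklyCalc weeklyCalc_alt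
  cases b with
  | false => simp
  | true =>
    simp only [Bool.not_true, Bool.false_or, if_neg (by simp : ¬ (true = false))]
    by_cases hd : days ≤ 0
    · rw [weeklyCalcLoop]
      simp [hd]
    · rw [weeklyCalcLoop_eq days.toNat 0 s 0 days (by omega)]
      have hdn : ((days.toNat : Int)) = days := by omega
      simp only [bonusCF, hdn]
      simp only [hd, decide_false]
      rw [PySem.Int.floordiv_eq_ediv_of_pos (by norm_num)]
      split_ifs with h1 h2 h2 <;> first | omega | exact h2.elim
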